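-- pv_equiv track=rewrite | github.com/gsahin2/Visual-Data-Transfer | python/grid_codec.py | majority_symbols
-- ===== SOURCE A (Python) =====
-- from typing import Callable, List, Optional, Sequence, Tuple
--
-- def majority_symbols(symbol_frames: Sequence[Sequence[int]]) -> List[int]:
--     """Per-cell plurality over several symbol rows (each row length N, values 0..3)."""
--     frames = [list(f) for f in symbol_frames]
--     if not frames:
--         return []
--     n = len(frames[0])
--     out: List[int] = []
--     for i in range(n):
--         counts = [0, 0, 0, 0]
--         for f in frames:
--             counts[f[i] & 3] += 1
--         best = max(range(4), key=lambda k: counts[k])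
--         out.append(best)
--     return out
-- ===== SOURCE B (Python) =====
-- from typing import List, Sequence
--
--
-- def majority_symbols(symbol_frames: Sequence[Sequence[int]]) -> List[int]:
--     """Per-cell plurality: sort each cell's column and return the value of its longest run."""
--     frames = [list(f) for f in symbol_frames]
--     if not frames:
--         return []
--     n = len(frames[0])
--     out: List[int] = []
--     for i in range(n):
--         col = sorted(f[i] & 3 for f in frames)
--         best, best_len = col[0], 1
--         run, run_len = col[0], 1
--         for v in col[1:]:
--             if v == run:
--                 run_len += 1
--             else:
--                 run, run_len = v, 1
--             if run_len > best_len: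
--                 best, best_len = run, run_len
--         out.append(best)
--     return out
-- ===== Notes on version B (the rewrite author's own statement) =====
-- stated objective: alternative
-- what changed: Instead of tallying a 4-way count array per cell and taking its argmax, B sorts each cell's masked column and scans it once for its longest run (first/smallest value on ties), a sort-and-run-length plurality; Pre_ excludes ragged inputs whose later frame is shorter than the first, on which A (and B) raise IndexError.
import Mathlib
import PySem

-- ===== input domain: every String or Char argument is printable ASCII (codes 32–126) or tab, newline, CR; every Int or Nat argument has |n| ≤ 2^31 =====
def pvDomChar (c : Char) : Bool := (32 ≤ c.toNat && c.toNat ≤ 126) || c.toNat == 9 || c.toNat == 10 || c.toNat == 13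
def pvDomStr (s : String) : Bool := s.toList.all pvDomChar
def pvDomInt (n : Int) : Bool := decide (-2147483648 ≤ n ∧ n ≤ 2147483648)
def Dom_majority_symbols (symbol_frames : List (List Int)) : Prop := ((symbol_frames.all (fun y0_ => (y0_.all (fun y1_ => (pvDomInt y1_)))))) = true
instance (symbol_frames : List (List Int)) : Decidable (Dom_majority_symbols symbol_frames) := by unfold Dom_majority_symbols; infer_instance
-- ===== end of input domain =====

-- B sorts each cell's masked column and takes the value of its longest run
-- (first run wins ties) instead of A's 4-way count table + argmax per cell
-- (alternative algorithm: sort-and-run-length plurality; not faster).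


-- ===== PORT A =====
def majority_symbols (symbol_frames : List (List Int)) : List Int :=
  let frames := symbol_frames.map (fun f => f)
  if frames.isEmpty then []
  else
    let n : Int := (frames.headD []).length
    (PySem.List.pyRange 0 n 1).foldl (fun out i =>
      let counts := frames.foldl (fun counts f =>
        let idx := PySem.Int.band (PySem.List.pyGetD f i 0) 3
        PySem.List.pySetD counts idx (PySem.List.pyGetD counts idx 0 + 1))
        ([0, 0, 0, 0] : List Int)
      out ++ [(PySem.List.max? (PySem.List.pyRange 0 4 1)
                (fun k => PySem.List.pyGetD counts k 0)).getD 0]) []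

-- ===== PORT B =====
def majority_symbols_alt (symbol_frames : List (List Int)) : List Int :=
  let frames := symbol_frames.map (fun f => f)
  if frames.isEmpty then []
  else
    let n : Int := (frames.headD []).length
    (PySem.List.pyRange 0 n 1).foldl (fun out i =>
      let col := PySem.List.sorted
        (frames.map (fun f => PySem.Int.band (PySem.List.pyGetD f i 0) 3)) (fun x => x) false
      -- state s = (best, best_len, run, run_len); col[1:] is col.drop 1 (exact for a Python [1:] slice)
      let s := (col.drop 1).foldl (fun (s : Int × Int × Int × Int) v =>
          let rp := if v = s.2.2.1 then (s.2.2.1, s.2.2.2 + 1) else (v, (1 : Int))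
          if s.2.1 < rp.2 then (rp.1, rp.2, rp.1, rp.2) else (s.1, s.2.1, rp.1, rp.2))
        (col.headD 0, 1, col.headD 0, 1)
      out ++ [s.1]) []

-- ===== PRECONDITION & SPEC =====
-- Pre_ excludes exactly the ragged inputs on which some frame is shorter than the
-- first frame: there both Pythons raise IndexError (f[i] out of range), so A returns no value.
def Pre_majority_symbols (symbol_frames : List (List Int)) : Prop :=
  ∀ f ∈ symbol_frames, (symbol_frames.headD []).length ≤ f.length
instance (symbol_frames : List (List Int)) : Decidable (Pre_majority_symbols symbol_frames) := by
  unfold Pre_majority_symbols; infer_instance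

def pvWitness_majority_symbols : List (List Int) := [[0, 1, 2], [1, 1, 3], [2, 1, 3]]

def Spec_majority_symbols (symbol_frames : List (List Int)) (out : List Int) : Prop := out = majority_symbols_alt symbol_frames
instance (symbol_frames : List (List Int)) (out : List Int) : Decidable (Spec_majority_symbols symbol_frames out) := by unfold Spec_majority_symbols; infer_instance

-- ===== CLAIM (what is proved, stated in full; the proofs are below) =====
def Claim_equal_majority_symbols : Prop := ∀ (symbol_frames : List (List Int)), Dom_majority_symbols symbol_frames → Pre_majority_symbols symbol_frames → Spec_majority_symbols symbol_frames (majority_symbols symbol_frames)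

-- ===== LEMMAS AND PROOFS =====

-- the body of B's run-length scan, as a named step function (defeq to the port's lambda)
def pvStep (s : Int × Int × Int × Int) (v : Int) : Int × Int × Int × Int :=
  let rp := if v = s.2.2.1 then (s.2.2.1, s.2.2.2 + 1) else (v, (1 : Int))
  if s.2.1 < rp.2 then (rp.1, rp.2, rp.1, rp.2) else (s.1, s.2.1, rp.1, rp.2)

-- 'first maximum wins' reduction over (value, count) blocks
def pvPick : (Int × Int) → List (Int × Int) → Int × Int
  | s, [] => s
  | s, p :: t => pvPick (if s.2 < p.2 then p else s) t

-- the last block (or the current run if there is none)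
def pvLast : (Int × Int) → List (Int × Int) → Int × Int
  | s, [] => s
  | _, p :: t => pvLast p t

-- expand (value, count) blocks into the sorted column they describe
def pvBlocks (bs : List (Int × Int)) : List Int :=
  (bs.map (fun p => List.replicate p.2.toNat p.1)).flatten

-- the masked symbol is one of 0,1,2,3
theorem pvMask_range (a : Int) : 0 ≤ PySem.Int.band a 3 ∧ PySem.Int.band a 3 < 4 := by
  unfold PySem.Int.band
  split_ifs with h1 h2 h3
  · have hle : a.toNat &&& (3 : Int).toNat ≤ (3 : Int).toNat := Nat.and_le_right
    omega
  · omega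
  · have hle : (3 : Int).toNat - ((3 : Int).toNat &&& (-a - 1).toNat) ≤ (3 : Int).toNat :=
      Nat.sub_le _ _
    omega
  · omega

-- A's tally loop computes the four counts of the masked column
theorem pv_counts (xs : List Int) (h : ∀ v ∈ xs, 0 ≤ v ∧ v < 4) :
    ∀ (a b c d : Int),
      xs.foldl (fun cnt v => PySem.List.pySetD cnt v (PySem.List.pyGetD cnt v 0 + 1)) [a, b, c, d]
        = [a + xs.count 0, b + xs.count 1, c + xs.count 2, d + xs.count 3] := by
  induction xs with
  | nil => intro a b c d; simp
  | cons x t ih =>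
    intro a b c d
    have hx := h x (by simp)
    have ht : ∀ v ∈ t, 0 ≤ v ∧ v < 4 := fun v hv => h v (by simp [hv])
    have hx4 : x = 0 ∨ x = 1 ∨ x = 2 ∨ x = 3 := by omega
    simp only [List.foldl_cons]
    rcases hx4 with rfl | rfl | rfl | rfl <;>
      simp [PySem.List.pySetD_of_nonneg, PySem.List.pyGetD_of_nonneg, ih ht] <;> omega

-- scanning one same-valued run
theorem pvL1 (k : Nat) : ∀ (b bl v rl : Int), rl ≤ bl →
    (List.replicate k v).foldl pvStep (b, bl, v, rl)
      = if bl < rl + (k : Int) then (v, rl + (k : Int), v, rl + (k : Int))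
        else (b, bl, v, rl + (k : Int)) := by
  induction k with
  | zero =>
    intro b bl v rl hle
    rw [List.replicate_zero, List.foldl_nil, if_neg (by omega)]
    simp
  | succ m ih =>
    intro b bl v rl hle
    rw [List.replicate_succ, List.foldl_cons]
    have hstep : pvStep (b, bl, v, rl) v
        = if bl < rl + 1 then (v, rl + 1, v, rl + 1) else (b, bl, v, rl + 1) := by
      simp [pvStep]
    rw [hstep]
    by_cases hc : bl < rl + 1
    · rw [if_pos hc, ih v (rl + 1) v (rl + 1) le_rfl]
      split_ifs <;> simp [Prod.ext_iff] <;> omega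
    · rw [if_neg hc, ih b bl v (rl + 1) (by omega)]
      split_ifs <;> simp [Prod.ext_iff] <;> omega

-- scanning the remaining blocks = pvPick
theorem pvFold (bs : List (Int × Int)) : ∀ (b bl v rl : Int),
    (∀ p ∈ bs, 1 ≤ p.2) → (v :: bs.map Prod.fst).Pairwise (· < ·) → 1 ≤ rl → rl ≤ bl →
    (pvBlocks bs).foldl pvStep (b, bl, v, rl)
      = ((pvPick (b, bl) bs).1, (pvPick (b, bl) bs).2,
         (pvLast (v, rl) bs).1, (pvLast (v, rl) bs).2) := by
  induction bs with
  | nil => intro b bl v rl _ _ _ _; simp [pvBlocks, pvPick, pvLast]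
  | cons p t ih =>
    obtain ⟨w, k⟩ := p
    intro b bl v rl h1 hp hrl hbl
    have hk : 1 ≤ k := h1 (w, k) (by simp)
    rw [List.map_cons, List.pairwise_cons] at hp
    have hvw : v < w := hp.1 w (by simp)
    have hb : pvBlocks ((w, k) :: t) = List.replicate k.toNat w ++ pvBlocks t := by
      simp [pvBlocks]
    rw [hb, List.foldl_append]
    have hkn : k.toNat = (k.toNat - 1) + 1 := by omega
    rw [hkn, List.replicate_succ, List.foldl_cons]
    have hstep : pvStep (b, bl, v, rl) w = (b, bl, w, 1) := by
      simp [pvStep, show ¬ w = v by omega, show ¬ bl < 1 by omega]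
    rw [hstep, pvL1 _ _ _ _ _ (show (1 : Int) ≤ bl by omega)]
    have hcast : (1 : Int) + ((k.toNat - 1 : Nat) : Int) = k := by omega
    rw [hcast]
    have ht1 : ∀ p ∈ t, (1 : Int) ≤ p.2 := fun q hq => h1 q (by simp [hq])
    by_cases hc : bl < k
    · rw [if_pos hc, ih w k w k ht1 hp.2 (by omega) le_rfl]
      simp [pvPick, pvLast, hc]
    · rw [if_neg hc, ih b bl w k ht1 hp.2 (by omega) (by omega)]
      simp [pvPick, pvLast, hc]

-- sorting a column of values 0..3 yields its four count blocks in order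
theorem pv_sorted_eq_blocks (xs : List Int) (h : ∀ v ∈ xs, 0 ≤ v ∧ v < 4) :
    PySem.List.sorted xs (fun x => x) false
      = pvBlocks [(0, (xs.count 0 : Int)), (1, xs.count 1), (2, xs.count 2), (3, xs.count 3)] := by
  apply PySem.List.sorted_id_eq_of_perm_of_pairwise
  · rw [List.perm_iff_count]
    intro a
    by_cases h0 : a = 0
    · subst h0; simp [pvBlocks, List.count_append, List.count_replicate]
    by_cases h1 : a = 1
    · subst h1; simp [pvBlocks, List.count_append, List.count_replicate]
    by_cases h2 : a = 2
    · subst h2; simp [pvBlocks, List.count_append, List.count_replicate]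
    by_cases h3 : a = 3
    · subst h3; simp [pvBlocks, List.count_append, List.count_replicate]
    · have hnm : a ∉ xs := fun hm => by have := h a hm; omega
      simp [pvBlocks, List.count_append, List.count_replicate, List.count_eq_zero.2 hnm]
      exact ⟨fun e => absurd e.symm h0, fun e => absurd e.symm h1,
        fun e => absurd e.symm h2, fun e => absurd e.symm h3⟩
  · simp only [pvBlocks, List.map_cons, List.map_nil, List.flatten_cons, List.flatten_nil,
      List.append_nil]
    refine List.pairwise_append.2 ⟨List.pairwise_replicate.2 ?_, ?_, ?_⟩
    · right; exact le_rfl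
    · refine List.pairwise_append.2 ⟨List.pairwise_replicate.2 (by right; norm_num), ?_, ?_⟩
      · refine List.pairwise_append.2 ⟨List.pairwise_replicate.2 (by right; norm_num),
          List.pairwise_replicate.2 (by right; norm_num), ?_⟩
        intro x hx y hy
        rw [List.mem_replicate] at hx hy
        omega
      · intro x hx y hy
        rw [List.mem_replicate] at hx
        rw [List.mem_append, List.mem_replicate, List.mem_replicate] at hy
        rcases hy with hy | hy <;> omega
    · intro x hx y hy
      rw [List.mem_replicate] at hx
      simp only [List.mem_append, List.mem_replicate] at hy
      rcases hy with hy | hy | hy <;> omega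

-- zero-count blocks expand to nothing
theorem pvBlocks_filter (bs : List (Int × Int)) :
    pvBlocks (bs.filter (fun p => decide (0 < p.2))) = pvBlocks bs := by
  induction bs with
  | nil => rfl
  | cons p t ih =>
    by_cases hp : 0 < p.2
    · have hfc : ((p :: t).filter (fun p => decide (0 < p.2)))
          = p :: t.filter (fun p => decide (0 < p.2)) := by simp [hp]
      rw [hfc]
      simp only [pvBlocks, List.map_cons, List.flatten_cons] at ih ⊢
      rw [ih]
    · have hfc : ((p :: t).filter (fun p => decide (0 < p.2)))
          = t.filter (fun p => decide (0 < p.2)) := by simp [hp]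
      have h0 : p.2.toNat = 0 := by omega
      rw [hfc, ih]
      simp [pvBlocks, h0]

-- skipping nonpositive-count blocks does not change pvPick from a positive state
theorem pvPick_filter (t : List (Int × Int)) : ∀ (s : Int × Int), 1 ≤ s.2 →
    pvPick s (t.filter (fun p => decide (0 < p.2))) = pvPick s t := by
  induction t with
  | nil => intro s _; rfl
  | cons p r ih =>
    intro s hs
    by_cases hp : 0 < p.2
    · have hfc : ((p :: r).filter (fun p => decide (0 < p.2)))
          = p :: r.filter (fun p => decide (0 < p.2)) := by simp [hp]
      rw [hfc]
      simp only [pvPick]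
      have hs' : 1 ≤ (if s.2 < p.2 then p else s).2 := by split <;> omega
      exact ih _ hs'
    · have hfc : ((p :: r).filter (fun p => decide (0 < p.2)))
          = r.filter (fun p => decide (0 < p.2)) := by simp [hp]
      rw [hfc, ih s hs]
      simp only [pvPick, if_neg (show ¬ s.2 < p.2 by omega)]

-- A's start-at-zero-count reduction equals B's start at the first nonempty block
theorem pv_bridge (l : List (Int × Int)) : ∀ (s : Int × Int), 0 ≤ s.2 →
    ∀ q rest, ((s :: l).filter (fun p => decide (0 < p.2))) = q :: rest →
    pvPick s l = pvPick q rest := by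
  induction l with
  | nil =>
    intro s hs q rest hf
    by_cases h0 : 0 < s.2
    · have hfc : (([s] : List (Int × Int)).filter (fun p => decide (0 < p.2))) = [s] := by
        simp [h0]
      rw [hfc] at hf
      obtain ⟨rfl, rfl⟩ := List.cons.inj hf
      rfl
    · simp [h0] at hf
  | cons p t ih =>
    intro s hs q rest hf
    by_cases h0 : 0 < s.2
    · have hfc : ((s :: p :: t).filter (fun p => decide (0 < p.2)))
          = s :: (p :: t).filter (fun p => decide (0 < p.2)) := by simp [h0]
      rw [hfc] at hf
      obtain ⟨rfl, rfl⟩ := List.cons.inj hf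
      exact (pvPick_filter (p :: t) s (by omega)).symm
    · by_cases hp : 0 < p.2
      · have hfc : ((s :: p :: t).filter (fun p => decide (0 < p.2)))
            = p :: t.filter (fun p => decide (0 < p.2)) := by simp [h0, hp]
        rw [hfc] at hf
        obtain ⟨rfl, rfl⟩ := List.cons.inj hf
        have hstep : pvPick s (p :: t) = pvPick p t := by
          simp only [pvPick, if_pos (show s.2 < p.2 by omega)]
        rw [hstep]
        exact (pvPick_filter t p (by omega)).symm
      · have hf' : ((s :: t).filter (fun p => decide (0 < p.2))) = q :: rest := by
          have e1 : ((s :: p :: t).filter (fun p => decide (0 < p.2)))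
              = ((s :: t).filter (fun p => decide (0 < p.2))) := by
            simp [h0, hp]
          rw [← e1]; exact hf
        have : pvPick s (p :: t) = pvPick s t := by
          simp only [pvPick, if_neg (show ¬ s.2 < p.2 by omega)]
        rw [this]
        exact ih s hs q rest hf'

-- A's first-argmax over the count table, in pvPick form
theorem pvBestA_eq (a b c d : Int) :
    (PySem.List.max? (PySem.List.pyRange 0 4 1)
        (fun k => PySem.List.pyGetD [a, b, c, d] k 0)).getD 0
      = (pvPick (0, a) [(1, b), (2, c), (3, d)]).1 := by
  have hr : PySem.List.pyRange 0 4 1 = [0, 1, 2, 3] := by decide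
  rw [hr]
  have g0 : PySem.List.pyGetD [a, b, c, d] (0 : Int) 0 = a := by
    rw [PySem.List.pyGetD_of_nonneg _ _ (by norm_num)]; rfl
  have g1 : PySem.List.pyGetD [a, b, c, d] (1 : Int) 0 = b := by
    rw [PySem.List.pyGetD_of_nonneg _ _ (by norm_num)]; rfl
  have g2 : PySem.List.pyGetD [a, b, c, d] (2 : Int) 0 = c := by
    rw [PySem.List.pyGetD_of_nonneg _ _ (by norm_num)]; rfl
  have g3 : PySem.List.pyGetD [a, b, c, d] (3 : Int) 0 = d := by
    rw [PySem.List.pyGetD_of_nonneg _ _ (by norm_num)]; rfl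
  by_cases h1 : a < b
  · by_cases h2 : b < c
    · by_cases h3 : c < d
      · simp [PySem.List.max?, pvPick, g0, g1, g2, g3, h1, h2, h3]
      · simp [PySem.List.max?, pvPick, g0, g1, g2, g3, h1, h2, h3]
    · by_cases h3 : b < d
      · simp [PySem.List.max?, pvPick, g0, g1, g2, g3, h1, h2, h3]
      · simp [PySem.List.max?, pvPick, g0, g1, g2, g3, h1, h2, h3]
  · by_cases h2 : a < c
    · by_cases h3 : c < d
      · simp [PySem.List.max?, pvPick, g0, g1, g2, g3, h1, h2, h3]
      · simp [PySem.List.max?, pvPick, g0, g1, g2, g3, h1, h2, h3]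
    · by_cases h3 : a < d
      · simp [PySem.List.max?, pvPick, g0, g1, g2, g3, h1, h2, h3]
      · simp [PySem.List.max?, pvPick, g0, g1, g2, g3, h1, h2, h3]

-- per-cell: A's tally+argmax equals B's sort+longest-run on the same column
theorem pv_cell_eq (xs : List Int) (hne : xs ≠ []) (h : ∀ v ∈ xs, 0 ≤ v ∧ v < 4) :
    (PySem.List.max? (PySem.List.pyRange 0 4 1)
        (fun k => PySem.List.pyGetD [(xs.count 0 : Int), xs.count 1, xs.count 2, xs.count 3] k 0)).getD 0
      = (((PySem.List.sorted xs (fun x => x) false).drop 1).foldl pvStep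
          ((PySem.List.sorted xs (fun x => x) false).headD 0, 1,
           (PySem.List.sorted xs (fun x => x) false).headD 0, 1)).1 := by
  rw [pvBestA_eq, pv_sorted_eq_blocks xs h]
  obtain ⟨q, rest, hqr⟩ : ∃ q rest,
      (([((0 : Int), (xs.count 0 : Int)), (1, xs.count 1), (2, xs.count 2),
        (3, xs.count 3)] : List (Int × Int)).filter (fun p => decide (0 < p.2))) = q :: rest := by
    obtain ⟨x, hx⟩ := List.exists_mem_of_ne_nil xs hne
    have hx4 := h x hx
    have hcx : 0 < xs.count x := List.count_pos_iff.2 hx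
    have hx' : x = 0 ∨ x = 1 ∨ x = 2 ∨ x = 3 := by omega
    have hmem : ((x, (xs.count x : Int))) ∈
        (([((0 : Int), (xs.count 0 : Int)), (1, xs.count 1), (2, xs.count 2),
          (3, xs.count 3)] : List (Int × Int)).filter (fun p => decide (0 < p.2))) := by
      rw [List.mem_filter]
      constructor
      · rcases hx' with rfl | rfl | rfl | rfl <;> simp
      · simpa using hcx
    exact List.exists_cons_of_ne_nil (List.ne_nil_of_mem hmem)
  have hmemq : ∀ p ∈ q :: rest, (1 : Int) ≤ p.2 := by
    intro p hp
    rw [← hqr, List.mem_filter] at hp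
    have := of_decide_eq_true hp.2
    omega
  have hpw : ((q :: rest).map Prod.fst).Pairwise (· < ·) := by
    have hsub : List.Sublist (q :: rest) ([((0 : Int), (xs.count 0 : Int)), (1, xs.count 1),
        (2, xs.count 2), (3, xs.count 3)] : List (Int × Int)) := by
      rw [← hqr]; exact List.filter_sublist
    have h5 : (([((0 : Int), (xs.count 0 : Int)), (1, xs.count 1), (2, xs.count 2),
        (3, xs.count 3)] : List (Int × Int)).map Prod.fst).Pairwise (· < ·) := by
      rw [show (([((0 : Int), (xs.count 0 : Int)), (1, xs.count 1), (2, xs.count 2),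
        (3, xs.count 3)] : List (Int × Int)).map Prod.fst) = [(0 : Int), 1, 2, 3] from rfl]
      decide
    exact List.Pairwise.sublist (List.Sublist.map Prod.fst hsub) h5
  have hq1 : (1 : Int) ≤ q.2 := hmemq q (by simp)
  rw [← pvBlocks_filter, hqr]
  have hbq : pvBlocks (q :: rest)
      = q.1 :: (List.replicate (q.2.toNat - 1) q.1 ++ pvBlocks rest) := by
    simp only [pvBlocks, List.map_cons, List.flatten_cons]
    rw [show List.replicate q.2.toNat q.1 = q.1 :: List.replicate (q.2.toNat - 1) q.1 by
      rw [← List.replicate_succ]; congr 1; omega]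
    rfl
  rw [hbq]
  simp only [List.headD_cons, List.drop_one, List.tail_cons, List.foldl_append]
  rw [pvL1 _ _ _ _ _ le_rfl]
  have hfirst : (if (1 : Int) < 1 + ((q.2.toNat - 1 : Nat) : Int)
      then (q.1, 1 + ((q.2.toNat - 1 : Nat) : Int), q.1, 1 + ((q.2.toNat - 1 : Nat) : Int))
      else (q.1, (1 : Int), q.1, 1 + ((q.2.toNat - 1 : Nat) : Int))) = (q.1, q.2, q.1, q.2) := by
    split_ifs <;> simp [Prod.ext_iff] <;> omega
  rw [hfirst]
  rw [pvFold rest q.1 q.2 q.1 q.2 (fun p hp => hmemq p (by simp [hp]))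
    (by simpa using hpw) (by omega) le_rfl]
  have hbridge : pvPick (0, (xs.count 0 : Int)) [(1, (xs.count 1 : Int)), (2, xs.count 2),
      (3, xs.count 3)] = pvPick q rest :=
    pv_bridge _ _ (Int.natCast_nonneg _) q rest hqr
  rw [hbridge]

-- ===== VERDICT (by name: the statement is the Claim_ definition above) =====
theorem majority_symbols_spec : Claim_equal_majority_symbols := by
  intro sf _ _
  unfold Spec_majority_symbols
  cases sf with
  | nil => rfl
  | cons hd tl =>
    simp only [majority_symbols, majority_symbols_alt, List.map_id_fun', id,
      List.isEmpty_cons, Bool.false_eq_true, if_false, List.headD_cons]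
    rw [PySem.List.pyRange_zero_natCast hd.length]
    simp only [List.foldl_map]
    rw [PySem.List.foldl_append_singleton_eq_map, PySem.List.foldl_append_singleton_eq_map,
      List.nil_append, List.nil_append]
    apply List.map_congr_left
    intro k _
    have hmask : ∀ v ∈ (hd :: tl).map (fun f => PySem.Int.band (PySem.List.pyGetD f (k : Int) 0) 3),
        0 ≤ v ∧ v < 4 := by
      intro v hv
      rw [List.mem_map] at hv
      obtain ⟨f, _, rfl⟩ := hv
      exact pvMask_range _
    have hA : (hd :: tl).foldl (fun counts f =>
        PySem.List.pySetD counts (PySem.Int.band (PySem.List.pyGetD f (k : Int) 0) 3)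
          (PySem.List.pyGetD counts (PySem.Int.band (PySem.List.pyGetD f (k : Int) 0) 3) 0 + 1))
        ([0, 0, 0, 0] : List Int)
        = [(((hd :: tl).map (fun f => PySem.Int.band (PySem.List.pyGetD f (k : Int) 0) 3)).count 0 : Int),
           ((hd :: tl).map (fun f => PySem.Int.band (PySem.List.pyGetD f (k : Int) 0) 3)).count 1,
           ((hd :: tl).map (fun f => PySem.Int.band (PySem.List.pyGetD f (k : Int) 0) 3)).count 2,
           ((hd :: tl).map (fun f => PySem.Int.band (PySem.List.pyGetD f (k : Int) 0) 3)).count 3] := by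
      calc (hd :: tl).foldl (fun counts f =>
            PySem.List.pySetD counts (PySem.Int.band (PySem.List.pyGetD f (k : Int) 0) 3)
              (PySem.List.pyGetD counts (PySem.Int.band (PySem.List.pyGetD f (k : Int) 0) 3) 0 + 1))
            ([0, 0, 0, 0] : List Int)
          = ((hd :: tl).map (fun f => PySem.Int.band (PySem.List.pyGetD f (k : Int) 0) 3)).foldl
              (fun cnt v => PySem.List.pySetD cnt v (PySem.List.pyGetD cnt v 0 + 1))
              ([0, 0, 0, 0] : List Int) := by rw [List.foldl_map]
        _ = _ := by rw [pv_counts _ hmask 0 0 0 0]; simp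
    rw [hA]
    exact pv_cell_eq _ (by simp) hmask
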